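-- pv_equiv track=rewrite | github.com/jeffrey-s-wong/Python-Sudoku-Solver | grid.py | to_ter
-- ===== SOURCE A (Python) =====
-- def to_ter(dec, digits):
--     ter = []
--     while dec > 0:
--         ter.append(dec % 3)
--         dec //= 3
--     while len(ter) < digits:
--         ter.append(0)
--     ter.reverse()
--     return ter
-- ===== SOURCE B (Python) =====
-- def _ndig(d):
--     return 0 if d <= 0 else 1 + _ndig(d // 3)
--
-- def to_ter(dec, digits):
--     d = dec if dec > 0 else 0
--     nd = _ndig(d)
--     pad = digits - nd if digits > nd else 0
--     return [0] * pad + [d // 3 ** i % 3 for i in range(nd - 1, -1, -1)]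
-- ===== Notes on version B (the rewrite author's own statement) =====
-- stated objective: alternative
-- what changed: B first counts the ternary digits of the (clamped) number recursively, then builds the result most-significant-first as a zero prefix [0]*max(digits-count,0) followed by the positional digits d // 3**i % 3, replacing A's least-significant-first accumulation loop, separate zero-padding loop and final reverse; the bulk zero prefix is the constant-factor win.
import Mathlib
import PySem

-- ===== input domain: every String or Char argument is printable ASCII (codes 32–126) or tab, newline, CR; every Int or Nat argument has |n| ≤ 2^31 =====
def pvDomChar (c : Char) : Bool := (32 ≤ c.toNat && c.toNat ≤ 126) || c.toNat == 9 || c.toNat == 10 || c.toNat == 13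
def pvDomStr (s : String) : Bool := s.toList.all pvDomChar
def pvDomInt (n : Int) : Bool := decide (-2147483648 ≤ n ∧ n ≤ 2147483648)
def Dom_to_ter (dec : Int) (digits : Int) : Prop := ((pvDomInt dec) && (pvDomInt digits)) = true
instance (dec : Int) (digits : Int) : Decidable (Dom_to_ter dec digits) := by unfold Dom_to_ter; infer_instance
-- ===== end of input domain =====

-- B replaces A's least-significant-first digit loop + padding loop + reverse by computing the
-- output length first and emitting digits most-significant-first via d // 3**i % 3 (alternative decomposition).

-- ===== PORT A =====
-- while dec > 0: ter.append(dec % 3); dec //= 3   (builds LSB-first digit list)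
def toTerLoop (dec : Int) : List Int :=
  if h : 0 < dec then
    PySem.Int.mod dec 3 :: toTerLoop (PySem.Int.floordiv dec 3)
  else []
termination_by dec.toNat
decreasing_by
  have := PySem.Int.floordiv_eq_ediv_of_pos (a := dec) (b := 3) (by omega)
  omega

-- while len(ter) < digits: ter.append(0)
def toTerPad (ter : List Int) (digits : Int) : List Int :=
  if h : (ter.length : Int) < digits then toTerPad (ter ++ [0]) digits else ter
termination_by (digits - ter.length).toNat
decreasing_by simp; omega

def to_ter (dec : Int) (digits : Int) : List Int :=
  (toTerPad (toTerLoop dec) digits).reverse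

-- ===== PORT B =====
-- _ndig(d) = 0 if d <= 0 else 1 + _ndig(d // 3)
def ndig (d : Int) : Int :=
  if h : d ≤ 0 then 0 else 1 + ndig (PySem.Int.floordiv d 3)
termination_by d.toNat
decreasing_by
  have := PySem.Int.floordiv_eq_ediv_of_pos (a := d) (b := 3) (by omega)
  omega

-- [0] * pad + [d // 3 ** i % 3 for i in range(nd - 1, -1, -1)]; 3 ** i is ported as
-- 3 ^ i.toNat, exact since every i produced by the range is ≥ 0; [0] * pad is
-- List.replicate pad.toNat 0, exact since Python's list repetition treats pad ≤ 0 as empty.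
def to_ter_alt (dec : Int) (digits : Int) : List Int :=
  let d : Int := if 0 < dec then dec else 0
  let nd : Int := ndig d
  let pad : Int := if digits > nd then digits - nd else 0
  List.replicate pad.toNat 0 ++
    (PySem.List.pyRange (nd - 1) (-1) (-1)).map
      (fun i => PySem.Int.mod (PySem.Int.floordiv d (3 ^ i.toNat)) 3)

-- ===== PRECONDITION & SPEC =====
def Spec_to_ter (dec : Int) (digits : Int) (out : List Int) : Prop := out = to_ter_alt dec digits
instance (dec : Int) (digits : Int) (out : List Int) : Decidable (Spec_to_ter dec digits out) := by unfold Spec_to_ter; infer_instance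

-- ===== CLAIM (what is proved, stated in full; the proofs are below) =====
def Claim_equal_to_ter : Prop := ∀ (dec : Int) (digits : Int), Dom_to_ter dec digits → Spec_to_ter dec digits (to_ter dec digits)

-- ===== LEMMAS AND PROOFS =====

theorem ndig_eq_length (d : Int) : ndig d = ((toTerLoop d).length : Int) := by
  fun_induction ndig d with
  | case1 d h => rw [toTerLoop, dif_neg (show ¬ 0 < d by omega)]; simp
  | case2 d h ih =>
      rw [toTerLoop, dif_pos (show 0 < d by omega), ih]
      simp [List.length_cons]
      omega

theorem toTerPad_eq (ter : List Int) (digits : Int) :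
    toTerPad ter digits = ter ++ List.replicate (digits - ter.length).toNat 0 := by
  fun_induction toTerPad ter digits with
  | case1 ter h ih =>
      rw [ih, List.append_assoc]
      congr 1
      have : (digits - ter.length).toNat = (digits - (ter ++ [0]).length).toNat + 1 := by
        simp; omega
      rw [this, List.replicate_succ]
      simp
  | case2 ter h =>
      have : (digits - ter.length).toNat = 0 := by omega
      simp [this]

theorem toTerLoop_key (d : Int) (hd : 0 ≤ d) : ∀ (n : Nat), (toTerLoop d).length ≤ n →
    (List.range n).map (fun k => PySem.Int.mod (PySem.Int.floordiv d (3 ^ k)) 3)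
      = toTerLoop d ++ List.replicate (n - (toTerLoop d).length) 0 := by
  fun_induction toTerLoop d with
  | case2 d h =>
      intro n _
      have hd0 : d = 0 := by omega
      subst hd0
      simp only [List.nil_append, List.length_nil, Nat.sub_zero]
      induction n with
      | zero => simp
      | succ m ihm =>
          rw [List.range_succ, List.map_append, ihm, List.replicate_succ']
          congr 1
          simp
  | case1 d h ih =>
      intro n hn
      match n with
      | 0 => simp at hn
      | m + 1 =>
        rw [List.range_succ_eq_map, List.map_cons, List.map_map]
        have hd3 : 0 ≤ PySem.Int.floordiv d 3 := by
          rw [PySem.Int.floordiv_eq_ediv_of_pos (by omega)]; omega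
        have hlen : (toTerLoop (PySem.Int.floordiv d 3)).length ≤ m := by
          rw [List.length_cons] at hn; omega
        have hstep : ∀ k : Nat,
            PySem.Int.mod (PySem.Int.floordiv d (3 ^ (k + 1))) 3
              = PySem.Int.mod (PySem.Int.floordiv (PySem.Int.floordiv d 3) (3 ^ k)) 3 := by
          intro k
          rw [PySem.Int.floordiv_eq_ediv_of_pos (a := d) (b := 3 ^ (k+1)) (by positivity),
              PySem.Int.floordiv_eq_ediv_of_pos (a := d) (b := 3) (by omega),
              PySem.Int.floordiv_eq_ediv_of_pos (a := d / 3) (b := 3 ^ k) (by positivity),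
              Int.ediv_ediv_of_nonneg (by omega)]
          congr 1
          rw [pow_succ]
          ring_nf
      -- head digit: 3 ^ 0 = 1, d // 1 = d
        have hhead : PySem.Int.mod (PySem.Int.floordiv d (3 ^ (0:Nat))) 3 = PySem.Int.mod d 3 := by
          rw [pow_zero, PySem.Int.floordiv_eq_ediv_of_pos (by omega)]
          simp
        rw [hhead]
        have : ((List.range m).map fun k => PySem.Int.mod (PySem.Int.floordiv d (3 ^ (k+1))) 3)
            = (List.range m).map
                (fun k => PySem.Int.mod (PySem.Int.floordiv (PySem.Int.floordiv d 3) (3 ^ k)) 3) := by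
          exact List.map_congr_left (fun k _ => hstep k)
        simp only [Function.comp_def, Nat.succ_eq_add_one]
        rw [this, ih hd3 m hlen]
        simp

theorem map_range_desc (f : Int → Int) (n : Nat) :
    (List.range n).map (fun (k : Nat) => f ((n : Int) - 1 - (k : Int)))
      = ((List.range n).map (fun (k : Nat) => f (k : Int))).reverse := by
  induction n with
  | zero => simp
  | succ m ih =>
      conv_lhs => rw [List.range_succ_eq_map]
      conv_rhs => rw [List.range_succ]
      rw [List.map_cons, List.map_map, List.map_append, List.reverse_append, ← ih]
      simp only [List.map_cons, List.map_nil, List.reverse_cons, List.reverse_nil,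
        List.nil_append, List.singleton_append]
      congr 1
      · congr 1
        push_cast
        ring
      · apply List.map_congr_left
        intro k _
        simp only [Function.comp_apply]
        congr 1
        push_cast
        ring

theorem toTerLoop_clamp (dec : Int) :
    toTerLoop dec = toTerLoop (if 0 < dec then dec else 0) := by
  by_cases h : 0 < dec
  · simp [h]
  · have h1 : toTerLoop dec = [] := by rw [toTerLoop, dif_neg h]
    have h2 : toTerLoop 0 = [] := by rw [toTerLoop]; simp
    rw [if_neg h, h1, h2]

-- ===== VERDICT (by name: the statement is the Claim_ definition above) =====
theorem to_ter_spec : Claim_equal_to_ter := by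
  intro dec digits _
  simp only [Spec_to_ter, to_ter, to_ter_alt]
  set d : Int := if 0 < dec then dec else 0 with hd_def
  have hd : 0 ≤ d := by rw [hd_def]; split <;> omega
  have hnd : ndig d = ((toTerLoop d).length : Int) := ndig_eq_length d
  -- B side: rewrite the countdown range and flip it into a reverse
  rw [PySem.List.pyRange_neg_one, List.map_map]
  have hcount : (ndig d - 1 - (-1)).toNat = (toTerLoop d).length := by omega
  rw [hcount]
  have hflip : ((List.range (toTerLoop d).length).map
      ((fun i : Int => PySem.Int.mod (PySem.Int.floordiv d (3 ^ i.toNat)) 3) ∘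
        (fun k : Nat => ndig d - 1 - (k : Int))))
      = (List.range (toTerLoop d).length).map
        (fun k : Nat => (fun i : Int => PySem.Int.mod (PySem.Int.floordiv d (3 ^ i.toNat)) 3)
          (((toTerLoop d).length : Int) - 1 - (k : Int))) := by
    apply List.map_congr_left
    intro k _
    simp only [Function.comp_apply]
    rw [hnd]
  rw [hflip,
    map_range_desc (fun i : Int => PySem.Int.mod (PySem.Int.floordiv d (3 ^ i.toNat)) 3)]
  have hsimpl : ((List.range (toTerLoop d).length).map
      (fun k : Nat => PySem.Int.mod (PySem.Int.floordiv d (3 ^ ((k : Int)).toNat)) 3))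
      = (List.range (toTerLoop d).length).map
        (fun k : Nat => PySem.Int.mod (PySem.Int.floordiv d (3 ^ k)) 3) := by
    apply List.map_congr_left
    intro k _
    simp
  rw [hsimpl, toTerLoop_key d hd (toTerLoop d).length le_rfl]
  -- A side
  rw [toTerLoop_clamp dec, ← hd_def, toTerPad_eq, List.reverse_append, List.reverse_replicate]
  simp only [Nat.sub_self, List.replicate_zero, List.append_nil]
  congr 2
  omega
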